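-- pv_equiv track=rewrite | github.com/jeongmincha/solving-algorithm | programmers/coding_test_practice/graph/number_of_rooms.py | solution
-- ===== SOURCE A (Python) =====
-- def solution(arrows):
--     from collections import deque
--
--     CHANGE_X = [-1, -1, 0, 1, 1, 1, 0, -1]
--     CHANGE_Y = [0, 1, 1, 1, 0, -1, -1, -1]
--
--     answer = 0
--     visited = {}
--     path = {}
--     q = deque()
--
--     visited[(0, 0)] = False
--     q.append((0, 0))
--
--     x, y = 0, 0
--     for arrow in arrows:
--         for _ in range(2):
--             new_x = x + CHANGE_X[arrow]
--             new_y = y + CHANGE_Y[arrow]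
--             visited[(new_x, new_y)] = False
--             path[(x, y, new_x, new_y)] = False
--             path[(new_x, new_y, x, y)] = True
--             q.append((new_x, new_y))
--             x, y = new_x, new_y
--
--     x, y = q.popleft()
--     visited[(x, y)] = True
--     while q:
--         new_x, new_y = q.popleft()
--
--         if visited[(new_x, new_y)]:
--             if path[(x, y, new_x, new_y)] is False:
--                 answer += 1
--                 path[(x, y, new_x, new_y)] = True
--                 path[(new_x, new_y, x, y)] = True
--         else:
--             visited[(new_x, new_y)] = True
--             path[(x, y, new_x, new_y)] = True
--             path[(new_x, new_y, x, y)] = True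
--
--         x, y = new_x, new_y
--
--     return answer
-- ===== SOURCE B (Python) =====
-- def solution(arrows):
--     CHANGE_X = [-1, -1, 0, 1, 1, 1, 0, -1]
--     CHANGE_Y = [0, 1, 1, 1, 0, -1, -1, -1]
--     answer = 0
--     points = {(0, 0)}
--     edges = set()
--     x, y = 0, 0
--     for arrow in arrows:
--         for _ in range(2):
--             nx = x + CHANGE_X[arrow]
--             ny = y + CHANGE_Y[arrow]
--             if (nx, ny) in points and (x, y, nx, ny) not in edges:
--                 answer += 1
--             points.add((nx, ny))
--             edges.add((x, y, nx, ny))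
--             edges.add((nx, ny, x, y))
--             x, y = nx, ny
--     return answer
-- ===== Notes on version B (the rewrite author's own statement) =====
-- stated objective: simpler
-- what changed: B replaces A's two-phase build-then-replay (pre-building a deque of all path points plus visited/path dicts keyed on directed edges, then replaying the queue) with a single pass over the doubled steps that maintains a set of visited points and a set of traversed directed edges, counting a room whenever a step reaches an already-visited point over a fresh edge.
import Mathlib
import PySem

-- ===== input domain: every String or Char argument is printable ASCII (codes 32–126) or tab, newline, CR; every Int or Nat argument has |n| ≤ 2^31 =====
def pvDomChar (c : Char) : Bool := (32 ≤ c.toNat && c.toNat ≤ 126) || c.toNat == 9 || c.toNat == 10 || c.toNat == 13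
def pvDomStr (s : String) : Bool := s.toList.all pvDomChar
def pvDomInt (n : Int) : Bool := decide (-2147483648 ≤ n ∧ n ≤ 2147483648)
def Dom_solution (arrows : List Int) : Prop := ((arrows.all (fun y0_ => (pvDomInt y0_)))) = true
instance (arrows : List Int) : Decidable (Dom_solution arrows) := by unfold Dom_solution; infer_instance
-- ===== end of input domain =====

-- B replaces A's build-then-replay (deque + visited/path dicts) by one pass keeping a set of
-- visited points and a set of traversed directed edges (objective: simpler).

abbrev pvPt := Int × Int
abbrev pvEd := Int × Int × Int × Int

def pvCX : List Int := [-1, -1, 0, 1, 1, 1, 0, -1]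
def pvCY : List Int := [0, 1, 1, 1, 0, -1, -1, -1]

-- ===== PORT A =====
-- state: (visited, path, q, x, y); `visited[(…)]` / `path[(…)]` lookups are ported as getD —
-- the keys are always present when A runs, so the defaults are never consulted.
def solution (arrows : List Int) : Int :=
  let s1 := arrows.foldl (fun s arrow =>
      (PySem.List.pyRange 0 2 1).foldl (fun (s : PySem.Dict pvPt Bool × PySem.Dict pvEd Bool × List pvPt × Int × Int) _ =>
        let (visited, path, q, x, y) := s
        let nx := x + (PySem.List.pyGet? pvCX arrow).getD 0
        let ny := y + (PySem.List.pyGet? pvCY arrow).getD 0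
        (visited.insert (nx, ny) false,
         (path.insert (x, y, nx, ny) false).insert (nx, ny, x, y) true,
         q ++ [(nx, ny)], nx, ny)) s)
    ((PySem.Dict.empty.insert ((0 : Int), (0 : Int)) false), PySem.Dict.empty, [((0 : Int), (0 : Int))], (0 : Int), (0 : Int))
  let (visited, path, q, _, _) := s1
  match q with
  | [] => 0  -- unreachable: q always starts with (0,0)
  | (x0, y0) :: rest =>
    let visited := visited.insert (x0, y0) true
    let fin := rest.foldl (fun (st : Int × PySem.Dict pvPt Bool × PySem.Dict pvEd Bool × Int × Int) p =>
        let (answer, visited, path, x, y) := st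
        let (nx, ny) := p
        if visited.getD (nx, ny) false then
          if path.getD (x, y, nx, ny) true = false then
            (answer + 1, visited, (path.insert (x, y, nx, ny) true).insert (nx, ny, x, y) true, nx, ny)
          else (answer, visited, path, nx, ny)
        else
          (answer, visited.insert (nx, ny) true,
           (path.insert (x, y, nx, ny) true).insert (nx, ny, x, y) true, nx, ny))
      ((0 : Int), visited, path, x0, y0)
    fin.1

-- ===== PORT B =====
def solution_alt (arrows : List Int) : Int :=
  let fin := arrows.foldl (fun s arrow =>
      (PySem.List.pyRange 0 2 1).foldl (fun (s : Int × PySem.Set pvPt × PySem.Set pvEd × Int × Int) _ =>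
        let (answer, points, edges, x, y) := s
        let nx := x + (PySem.List.pyGet? pvCX arrow).getD 0
        let ny := y + (PySem.List.pyGet? pvCY arrow).getD 0
        let answer := if points.contains (nx, ny) && !(edges.contains (x, y, nx, ny)) then answer + 1 else answer
        (answer, points.add (nx, ny), (edges.add (x, y, nx, ny)).add (nx, ny, x, y), nx, ny)) s)
    ((0 : Int), PySem.Set.ofList [((0 : Int), (0 : Int))], (PySem.Set.empty : PySem.Set pvEd), (0 : Int), (0 : Int))
  fin.1

-- ===== PRECONDITION & SPEC =====
-- Pre_ excludes exactly the arrows on which Python A raises IndexError (list index out of range):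
-- any entry outside -8 ≤ a < 8 (negative entries in [-8,-1] wrap around, as in Python).
def Pre_solution (arrows : List Int) : Prop := ∀ a ∈ arrows, -8 ≤ a ∧ a < 8
instance (arrows : List Int) : Decidable (Pre_solution arrows) := by unfold Pre_solution; infer_instance
def pvWitness_solution : List Int := [0, 1, 2, 3, 4, 5, 6, 7, -1, 4, 0]

def Spec_solution (arrows : List Int) (out : Int) : Prop := out = solution_alt arrows
instance (arrows : List Int) (out : Int) : Decidable (Spec_solution arrows out) := by unfold Spec_solution; infer_instance

-- ===== CLAIM (what is proved, stated in full; the proofs are below) =====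
def Claim_equal_solution : Prop := ∀ (arrows : List Int), Dom_solution arrows → Pre_solution arrows → Spec_solution arrows (solution arrows)

-- ===== LEMMAS AND PROOFS =====

def pvDelta (a : Int) : pvPt := ((PySem.List.pyGet? pvCX a).getD 0, (PySem.List.pyGet? pvCY a).getD 0)
def pvWalk (c : pvPt) : List Int → List (pvPt × pvPt)
  | [] => []
  | a :: ds =>
    let n : pvPt := (c.1 + (pvDelta a).1, c.2 + (pvDelta a).2)
    (c, n) :: pvWalk n ds
def pvKey (e : pvPt × pvPt) : pvEd := (e.1.1, e.1.2, e.2.1, e.2.2)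
def pvRv (e : pvPt × pvPt) : pvPt × pvPt := (e.2, e.1)
def pvVis0 (v : PySem.Dict pvPt Bool) (W : List (pvPt × pvPt)) : PySem.Dict pvPt Bool :=
  W.foldl (fun d e => d.insert e.2 false) v

theorem pvFirstPass (ds : List Int) (v : PySem.Dict pvPt Bool) (p : PySem.Dict pvEd Bool)
    (q : List pvPt) (c : pvPt) :
    ds.foldl (fun (s : PySem.Dict pvPt Bool × PySem.Dict pvEd Bool × List pvPt × Int × Int) a =>
        let (visited, path, q, x, y) := s
        let nx := x + (PySem.List.pyGet? pvCX a).getD 0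
        let ny := y + (PySem.List.pyGet? pvCY a).getD 0
        (visited.insert (nx, ny) false,
         (path.insert (x, y, nx, ny) false).insert (nx, ny, x, y) true,
         q ++ [(nx, ny)], nx, ny)) (v, p, q, c.1, c.2)
      = (pvVis0 v (pvWalk c ds),
         (pvWalk c ds).foldl (fun d e => (d.insert (pvKey e) false).insert (pvKey (pvRv e)) true) p,
         q ++ (pvWalk c ds).map (·.2), ((pvWalk c ds).foldl (fun _ e => e.2) c).1,
         ((pvWalk c ds).foldl (fun _ e => e.2) c).2) := by
  induction ds generalizing v p q c with
  | nil => simp [pvWalk, pvVis0]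
  | cons a ds ih =>
    simp only [List.foldl_cons, pvWalk, pvVis0, pvKey, pvRv]
    have := ih (v.insert (c.1 + (pvDelta a).1, c.2 + (pvDelta a).2) false)
      ((p.insert (c.1, c.2, c.1 + (pvDelta a).1, c.2 + (pvDelta a).2) false).insert
        (c.1 + (pvDelta a).1, c.2 + (pvDelta a).2, c.1, c.2) true)
      (q ++ [(c.1 + (pvDelta a).1, c.2 + (pvDelta a).2)])
      (c.1 + (pvDelta a).1, c.2 + (pvDelta a).2)
    simp only [pvVis0, pvKey, pvRv, pvDelta] at this
    simp [this, pvDelta]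

theorem pvWalk_ne (c : pvPt) (ds : List Int) (h : ∀ a ∈ ds, pvDelta a ≠ (0, 0)) :
    ∀ e ∈ pvWalk c ds, e.1 ≠ e.2 := by
  induction ds generalizing c with
  | nil => simp [pvWalk]
  | cons a ds ih =>
    simp only [pvWalk, List.mem_cons]
    rintro e (rfl | he)
    · have := h a (by simp)
      intro hcc
      apply this
      have h1 : c.1 = c.1 + (pvDelta a).1 := congrArg Prod.fst hcc
      have h2 : c.2 = c.2 + (pvDelta a).2 := congrArg Prod.snd hcc
      have : (pvDelta a).1 = 0 := by omega
      have : (pvDelta a).2 = 0 := by omega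
      exact Prod.ext ‹(pvDelta a).1 = 0› ‹(pvDelta a).2 = 0›
    · exact ih _ (fun b hb => h b (by simp [hb])) e he

theorem pvVis0_lookup (W : List (pvPt × pvPt)) : ∀ (v : PySem.Dict pvPt Bool),
    (∀ p, v.getD p false = false) → ∀ p, (pvVis0 v W).getD p false = false := by
  induction W with
  | nil => intro v hv p; exact hv p
  | cons e W ih =>
    intro v hv p
    refine ih _ (fun p' => ?_) p
    rw [PySem.Dict.getD_insert]
    split <;> simp [hv]
def pvPath0 (W : List (pvPt × pvPt)) : PySem.Dict pvEd Bool :=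
  W.foldl (fun d e => (d.insert (pvKey e) false).insert (pvKey (pvRv e)) true) PySem.Dict.empty
def pvPth (W : List (pvPt × pvPt)) (k : pvEd) : Bool := (pvPath0 W).getD k true

theorem pvKey_inj {a b : pvPt × pvPt} (h : pvKey a = pvKey b) : a = b := by
  rcases a with ⟨⟨a1, a2⟩, a3, a4⟩; rcases b with ⟨⟨b1, b2⟩, b3, b4⟩
  simp [pvKey] at h; simp [h.1, h.2.1, h.2.2.1, h.2.2.2]

theorem pvKey_rv_ne {f : pvPt × pvPt} (h : f.1 ≠ f.2) : pvKey f ≠ pvKey (pvRv f) := by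
  intro hk
  exact h (congrArg Prod.fst (pvKey_inj hk))

theorem pvPth_append_singleton (X : List (pvPt × pvPt)) (f : pvPt × pvPt) (k : pvEd) :
    pvPth (X ++ [f]) k = if k = pvKey (pvRv f) then true else if k = pvKey f then false else pvPth X k := by
  simp only [pvPth, pvPath0, List.foldl_append, List.foldl_cons, List.foldl_nil]
  rw [PySem.Dict.getD_insert, PySem.Dict.getD_insert]

theorem pvRv_rv (e : pvPt × pvPt) : pvRv (pvRv e) = e := rfl

theorem pvPth_xor (W : List (pvPt × pvPt)) (hne : ∀ f ∈ W, f.1 ≠ f.2) :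
    ∀ (d : pvPt × pvPt), (d ∈ W ∨ pvRv d ∈ W) →
    pvPth W (pvKey d) = !pvPth W (pvKey (pvRv d)) := by
  induction W using List.reverseRecOn with
  | nil => simp
  | append_singleton X f ih =>
    intro d hocc
    have hfne : f.1 ≠ f.2 := hne f (by simp)
    have hkfr : pvKey f ≠ pvKey (pvRv f) := pvKey_rv_ne hfne
    rw [pvPth_append_singleton, pvPth_append_singleton]
    by_cases h1 : d = pvRv f
    · subst h1
      rw [if_pos rfl, pvRv_rv, if_neg hkfr, if_pos rfl]
      rfl
    · by_cases h2 : d = f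
      · subst h2
        rw [if_neg hkfr, if_pos rfl, if_pos rfl]
        rfl
      · have k1 : pvKey d ≠ pvKey (pvRv f) := fun h => h1 (pvKey_inj h)
        have k2 : pvKey d ≠ pvKey f := fun h => h2 (pvKey_inj h)
        have k3 : pvKey (pvRv d) ≠ pvKey (pvRv f) := by
          intro h
          have := pvKey_inj h
          apply h2
          have := congrArg pvRv this
          simpa [pvRv_rv] using this
        have k4 : pvKey (pvRv d) ≠ pvKey f := by
          intro h
          have := pvKey_inj h
          apply h1
          have := congrArg pvRv this
          simpa [pvRv_rv] using this
        rw [if_neg k1, if_neg k2, if_neg k3, if_neg k4]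
        apply ih (fun g hg => hne g (by simp [hg]))
        rcases hocc with h | h <;> simp at h
        · rcases h with h | h
          · exact Or.inl h
          · exact absurd h h2
        · rcases h with h | h
          · exact Or.inr h
          · exact absurd (by simpa [pvRv_rv] using congrArg pvRv h) h1


theorem pvPth_future (pre : List (pvPt × pvPt)) (e : pvPt × pvPt) (hne : e.1 ≠ e.2) :
    ∀ (es : List (pvPt × pvPt)), pvPth (pre ++ e :: es) (pvKey e) = true → pvRv e ∈ es := by
  intro es
  induction es using List.reverseRecOn with
  | nil =>
    intro h
    rw [show pre ++ [e] = pre ++ [e] from rfl] at h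
    rw [pvPth_append_singleton, if_neg (pvKey_rv_ne hne)] at h
    simp at h
  | append_singleton es f ih =>
    intro h
    rw [show pre ++ e :: (es ++ [f]) = (pre ++ e :: es) ++ [f] by simp] at h
    rw [pvPth_append_singleton] at h
    by_cases h1 : pvKey e = pvKey (pvRv f)
    · have : e = pvRv f := pvKey_inj h1
      have : pvRv e = f := by rw [this, pvRv_rv]
      simp [this]
    · rw [if_neg h1] at h
      by_cases h2 : pvKey e = pvKey f
      · simp [h2] at h
      · rw [if_neg h2] at h
        exact List.mem_append_left _ (ih h)
def pvModelA : Int → PySem.Dict pvPt Bool → PySem.Dict pvEd Bool → List (pvPt × pvPt) → Int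
  | ans, _, _, [] => ans
  | ans, vis, path, e :: es =>
    if vis.getD e.2 false then
      if path.getD (pvKey e) true = false then
        pvModelA (ans + 1) vis ((path.insert (pvKey e) true).insert (pvKey (pvRv e)) true) es
      else pvModelA ans vis path es
    else
      pvModelA ans (vis.insert e.2 true) ((path.insert (pvKey e) true).insert (pvKey (pvRv e)) true) es

def pvModelB : Int → PySem.Set pvPt → PySem.Set pvEd → List (pvPt × pvPt) → Int
  | ans, _, _, [] => ans
  | ans, pts, edgs, e :: es =>
    pvModelB (if pts.contains e.2 && !(edgs.contains (pvKey e)) then ans + 1 else ans)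
      (pts.add e.2) ((edgs.add (pvKey e)).add (pvKey (pvRv e))) es

def pvChained : pvPt → List (pvPt × pvPt) → Prop
  | _, [] => True
  | c, e :: es => e.1 = c ∧ pvChained e.2 es

theorem pvWalk_chained (c : pvPt) (ds : List Int) : pvChained c (pvWalk c ds) := by
  induction ds generalizing c with
  | nil => trivial
  | cons a ds ih => exact ⟨rfl, ih _⟩

theorem pvDelta_ne (a : Int) (h1 : -8 ≤ a) (h2 : a < 8) : pvDelta a ≠ (0, 0) := by
  interval_cases a <;> decide

theorem pvReplayA (W : List (pvPt × pvPt)) : ∀ (c : pvPt) (ans : Int)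
    (vis : PySem.Dict pvPt Bool) (path : PySem.Dict pvEd Bool), pvChained c W →
    (((W.map (·.2)).foldl (fun (st : Int × PySem.Dict pvPt Bool × PySem.Dict pvEd Bool × Int × Int) p =>
        let (answer, visited, path, x, y) := st
        let (nx, ny) := p
        if visited.getD (nx, ny) false then
          if path.getD (x, y, nx, ny) true = false then
            (answer + 1, visited, (path.insert (x, y, nx, ny) true).insert (nx, ny, x, y) true, nx, ny)
          else (answer, visited, path, nx, ny)
        else
          (answer, visited.insert (nx, ny) true,
           (path.insert (x, y, nx, ny) true).insert (nx, ny, x, y) true, nx, ny))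
      (ans, vis, path, c.1, c.2)).1)
      = pvModelA ans vis path W := by
  induction W with
  | nil => intro c ans vis path _; rfl
  | cons e W ih =>
    rintro c ans vis path ⟨rfl, hch⟩
    simp only [List.map_cons, List.foldl_cons, pvModelA]
    by_cases hv : vis.getD e.2 false
    · by_cases hp : path.getD (pvKey e) true = false
      · simp only [pvKey, pvRv] at hp ⊢
        simp [hv, hp, ih e.2 _ _ _ hch]
      · simp only [pvKey, pvRv] at hp ⊢
        simp [hv, hp, ih e.2 _ _ _ hch]
    · simp only [pvKey, pvRv] at *
      simp [hv, ih e.2 _ _ _ hch]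

theorem pvFoldB (ds : List Int) : ∀ (c : pvPt) (ans : Int) (pts : PySem.Set pvPt) (edgs : PySem.Set pvEd),
    ((ds.foldl (fun (s : Int × PySem.Set pvPt × PySem.Set pvEd × Int × Int) a =>
        let (answer, points, edges, x, y) := s
        let nx := x + (PySem.List.pyGet? pvCX a).getD 0
        let ny := y + (PySem.List.pyGet? pvCY a).getD 0
        let answer := if points.contains (nx, ny) && !(edges.contains (x, y, nx, ny)) then answer + 1 else answer
        (answer, points.add (nx, ny), (edges.add (x, y, nx, ny)).add (nx, ny, x, y), nx, ny))
      (ans, pts, edgs, c.1, c.2)).1)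
      = pvModelB ans pts edgs (pvWalk c ds) := by
  induction ds with
  | nil => intro c ans pts edgs; rfl
  | cons a ds ih =>
    intro c ans pts edgs
    exact ih (c.1 + (pvDelta a).1, c.2 + (pvDelta a).2)
      (if pts.contains (c.1 + (pvDelta a).1, c.2 + (pvDelta a).2) &&
          !(edgs.contains (c.1, c.2, c.1 + (pvDelta a).1, c.2 + (pvDelta a).2)) then ans + 1 else ans)
      (pts.add (c.1 + (pvDelta a).1, c.2 + (pvDelta a).2))
      ((edgs.add (c.1, c.2, c.1 + (pvDelta a).1, c.2 + (pvDelta a).2)).add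
        (c.1 + (pvDelta a).1, c.2 + (pvDelta a).2, c.1, c.2))
theorem pvKey_eq_iff {a b : pvPt × pvPt} : pvKey a = pvKey b ↔ a = b :=
  ⟨pvKey_inj, fun h => by rw [h]⟩

theorem pvRv_inj {a b : pvPt × pvPt} : pvRv a = pvRv b ↔ a = b :=
  ⟨fun h => by have := congrArg pvRv h; simpa [pvRv_rv] using this, fun h => by rw [h]⟩

theorem pvNe_rv {e : pvPt × pvPt} (h : e.1 ≠ e.2) : e ≠ pvRv e := by
  intro he; exact h (congrArg Prod.fst he)

theorem pvMemAdd2 (edgs : PySem.Set pvEd) (e : pvPt × pvPt) (k : pvEd) :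
    k ∈ (edgs.add (pvKey e)).add (pvKey (pvRv e)) ↔ k ∈ edgs ∨ k = pvKey e ∨ k = pvKey (pvRv e) := by
  rw [PySem.Set.mem_add, PySem.Set.mem_add]; tauto

theorem pvC1_update (pth : pvEd → Bool) (path : PySem.Dict pvEd Bool) (O : Finset (pvPt × pvPt))
    (e : pvPt × pvPt) (hne : pvKey e ≠ pvKey (pvRv e))
    (hC1 : ∀ d : pvPt × pvPt, path.getD (pvKey d) true = (pth (pvKey d) || decide (d ∈ O))) :
    ∀ d : pvPt × pvPt, ((path.insert (pvKey e) true).insert (pvKey (pvRv e)) true).getD (pvKey d) true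
      = (pth (pvKey d) || decide (d ∈ insert e (insert (pvRv e) O))) := by
  intro d
  rw [PySem.Dict.getD_insert, PySem.Dict.getD_insert]
  by_cases h1 : d = pvRv e
  · subst h1; rw [if_pos rfl]; simp
  · by_cases h2 : d = e
    · subst h2; rw [if_neg hne, if_pos rfl]
      simp
    · rw [if_neg (by simpa [pvKey_eq_iff] using h1), if_neg (by simpa [pvKey_eq_iff] using h2), hC1 d]
      simp [Finset.mem_insert, h1, h2]

theorem pvSrev_update (edgs : PySem.Set pvEd) (e : pvPt × pvPt)
    (hSrev : ∀ d : pvPt × pvPt, pvKey d ∈ edgs ↔ pvKey (pvRv d) ∈ edgs) :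
    ∀ d : pvPt × pvPt, pvKey d ∈ (edgs.add (pvKey e)).add (pvKey (pvRv e))
      ↔ pvKey (pvRv d) ∈ (edgs.add (pvKey e)).add (pvKey (pvRv e)) := by
  intro d
  rw [pvMemAdd2, pvMemAdd2, hSrev d]
  have h1 : pvKey d = pvKey e ↔ pvKey (pvRv d) = pvKey (pvRv e) := by
    rw [pvKey_eq_iff, pvKey_eq_iff, pvRv_inj]
  have h2 : pvKey d = pvKey (pvRv e) ↔ pvKey (pvRv d) = pvKey e := by
    rw [pvKey_eq_iff, pvKey_eq_iff]
    constructor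
    · rintro rfl; rw [pvRv_rv]
    · rintro h; rw [← h, pvRv_rv]
  tauto
theorem pvCore (FullW : List (pvPt × pvPt)) (hdist : ∀ f ∈ FullW, f.1 ≠ f.2) :
    ∀ (es pre : List (pvPt × pvPt)) (c : pvPt) (ansA ansB : Int)
      (vis : PySem.Dict pvPt Bool) (path : PySem.Dict pvEd Bool)
      (pts : PySem.Set pvPt) (edgs : PySem.Set pvEd)
      (O P : Finset (pvPt × pvPt)),
      FullW = pre ++ es →
      pvChained c es →
      c ∈ pts →
      (∀ d : pvPt × pvPt, path.getD (pvKey d) true = (pvPth FullW (pvKey d) || decide (d ∈ O))) →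
      ansB = ansA + P.card →
      (∀ d : pvPt × pvPt, d ∈ P ↔ (pvKey d ∈ edgs ∧ d ∉ O ∧ pvPth FullW (pvKey d) = false)) →
      (∀ d : pvPt × pvPt, d ∈ O → pvKey d ∈ edgs) →
      (∀ d : pvPt × pvPt, pvKey d ∈ edgs ↔ pvKey (pvRv d) ∈ edgs) →
      (∀ p : pvPt, vis.getD p false = decide (p ∈ pts)) →
      (∀ d : pvPt × pvPt, pvKey d ∈ edgs → d.1 ∈ pts ∧ d.2 ∈ pts) →
      (∀ d ∈ P, d ∈ es) →
      pvModelA ansA vis path es = pvModelB ansB pts edgs es := by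
  intro es
  induction es with
  | nil =>
    intro pre c ansA ansB vis path pts edgs O P hW hch hc hC1 hC2 hP hOS hSrev hV hSV hfut
    have hPe : P = ∅ := Finset.eq_empty_iff_forall_notMem.mpr (fun d hd => by simpa using hfut d hd)
    simp [pvModelA, pvModelB, hC2, hPe]
  | cons e es ih =>
    intro pre c ansA ansB vis path pts edgs O P hW hch hc hC1 hC2 hP hOS hSrev hV hSV hfut
    obtain ⟨hec, hch'⟩ := hch
    have hin : e ∈ FullW := by rw [hW]; simp
    have hne_e : e.1 ≠ e.2 := hdist e hin
    have hKFR : pvKey e ≠ pvKey (pvRv e) := pvKey_rv_ne hne_e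
    have hG1 : pvPth FullW (pvKey e) = !pvPth FullW (pvKey (pvRv e)) :=
      pvPth_xor FullW hdist e (Or.inl hin)
    have hW' : FullW = (pre ++ [e]) ++ es := by simp [hW]
    simp only [pvModelA, pvModelB]
    rw [hV e.2, hC1 e]
    by_cases hq : e.2 ∈ pts
    · -- revisited point
      have hmemP : ∀ p : pvPt, p ∈ pts.add e.2 ↔ p ∈ pts := by
        intro p; rw [PySem.Set.mem_add]
        exact ⟨fun h => h.elim id (fun h => h ▸ hq), Or.inl⟩
      have hV' : ∀ p : pvPt, vis.getD p false = decide (p ∈ pts.add e.2) := by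
        intro p; rw [hV p]; exact decide_eq_decide.mpr (hmemP p).symm
      by_cases hS : pvKey e ∈ edgs
      · -- edge already traversed (by B); B does not count
        have hSr : pvKey (pvRv e) ∈ edgs := (hSrev e).mp hS
        have hScont : edgs.contains (pvKey e) = true := (PySem.Set.contains_iff _ _).mpr hS
        have hedgs' : ∀ k, k ∈ (edgs.add (pvKey e)).add (pvKey (pvRv e)) ↔ k ∈ edgs := by
          intro k; rw [pvMemAdd2]
          exact ⟨fun h => h.elim id (fun h => h.elim (fun h => h ▸ hS) (fun h => h ▸ hSr)), Or.inl⟩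
        have hP'gen : ∀ (O' : Finset (pvPt × pvPt)),
            (∀ d : pvPt × pvPt, d ∈ O' ↔ d ∈ O) →
            ∀ (P' : Finset (pvPt × pvPt)), (∀ d, d ∈ P' ↔ d ∈ P) →
            (∀ d : pvPt × pvPt, d ∈ P' ↔ (pvKey d ∈ (edgs.add (pvKey e)).add (pvKey (pvRv e)) ∧ d ∉ O' ∧ pvPth FullW (pvKey d) = false)) := by
          intro O' hO' P' hPP d
          rw [hPP d, hedgs' (pvKey d), hP d]
          simp [hO' d]
        by_cases hcond : pvPth FullW (pvKey e) = false ∧ e ∉ O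
        · -- A counts now (deferred count resolves)
          have heP : e ∈ P := (hP e).mpr ⟨hS, hcond.2, hcond.1⟩
          have hiftrue : (pvPth FullW (pvKey e) || decide (e ∈ O)) = false := by
            simp [hcond.1, hcond.2]
          rw [if_pos (by simp [hq]), if_pos hiftrue,
              if_neg (by simp [hq, hS])]
          refine ih (pre ++ [e]) e.2 (ansA + 1) ansB vis _ (pts.add e.2) _
            (insert e (insert (pvRv e) O)) (P.erase e) hW' hch' (by rw [hmemP]; exact hq)
            (pvC1_update _ path O e hKFR hC1) ?_ ?_ ?_ (pvSrev_update edgs e hSrev) hV' ?_ ?_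
          · have hcard : (P.erase e).card + 1 = P.card := Finset.card_erase_add_one heP
            rw [hC2]; omega
          · intro d
            by_cases h1 : d = e
            · subst h1; simp [Finset.mem_erase]
            · by_cases h2 : d = pvRv e
              · subst h2
                have hrvnP : pvRv e ∉ P := by
                  rw [hP]
                  rintro ⟨-, -, hpth⟩
                  rw [hcond.1, hpth] at hG1; simp at hG1
                simp [Finset.mem_erase, hrvnP]
              · rw [Finset.mem_erase, hedgs' (pvKey d), hP d]
                simp [Finset.mem_insert, h1, h2]
          · intro d hd
            rw [hedgs' (pvKey d)]
            rcases Finset.mem_insert.mp hd with rfl | hd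
            · exact hS
            · rcases Finset.mem_insert.mp hd with rfl | hd
              · exact hSr
              · exact hOS d hd
          · intro d hd
            rw [hedgs' (pvKey d)] at hd
            obtain ⟨h1, h2⟩ := hSV d hd
            exact ⟨(hmemP _).mpr h1, (hmemP _).mpr h2⟩
          · intro d hd
            obtain ⟨hde, hdP⟩ := Finset.mem_erase.mp hd
            rcases List.mem_cons.mp (hfut d hdP) with h | h
            · exact absurd h hde
            · exact h
        · -- A does not count either: nothing changes on A's side
          have hiffalse : ¬ ((pvPth FullW (pvKey e) || decide (e ∈ O)) = false) := by
            intro h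
            simp only [Bool.or_eq_false_iff, decide_eq_false_iff_not] at h
            exact hcond ⟨h.1, h.2⟩
          rw [if_pos (by simp [hq]), if_neg hiffalse,
              if_neg (by simp [hq, hS])]
          refine ih (pre ++ [e]) e.2 ansA ansB vis path (pts.add e.2) _
            O P hW' hch' (by rw [hmemP]; exact hq) hC1 hC2
            (hP'gen O (fun _ => Iff.rfl) P (fun _ => Iff.rfl)) ?_
            (pvSrev_update edgs e hSrev) hV' ?_ ?_
          · intro d hd; rw [hedgs' (pvKey d)]; exact hOS d hd
          · intro d hd
            rw [hedgs' (pvKey d)] at hd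
            obtain ⟨h1, h2⟩ := hSV d hd
            exact ⟨(hmemP _).mpr h1, (hmemP _).mpr h2⟩
          · intro d hd
            rcases List.mem_cons.mp (hfut d hd) with h | h
            · rw [h] at hd
              obtain ⟨-, hno, hpf⟩ := (hP e).mp hd
              exact absurd ⟨hpf, hno⟩ hcond
            · exact h
      · -- fresh edge closing a cycle: B counts now
        have hSr : pvKey (pvRv e) ∉ edgs := fun h => hS ((hSrev e).mpr h)
        have he_nO : e ∉ O := fun h => hS (hOS e h)
        have he_nP : e ∉ P := fun h => hS ((hP e).mp h).1
        have hrv_nP : pvRv e ∉ P := fun h => hSr ((hP (pvRv e)).mp h).1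
        have hSV' : ∀ d : pvPt × pvPt, pvKey d ∈ (edgs.add (pvKey e)).add (pvKey (pvRv e)) →
            d.1 ∈ pts.add e.2 ∧ d.2 ∈ pts.add e.2 := by
          intro d hd
          rcases (pvMemAdd2 edgs e (pvKey d)).mp hd with hd | hd | hd
          · obtain ⟨h1, h2⟩ := hSV d hd
            exact ⟨(hmemP _).mpr h1, (hmemP _).mpr h2⟩
          · rw [pvKey_inj hd]
            exact ⟨(hmemP _).mpr (show e.1 ∈ pts by rw [hec]; exact hc), (hmemP _).mpr hq⟩
          · rw [pvKey_inj hd]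
            exact ⟨(hmemP _).mpr hq, (hmemP _).mpr (show e.1 ∈ pts by rw [hec]; exact hc)⟩
        by_cases hpf : pvPth FullW (pvKey e) = false
        · -- A counts as well
          rw [if_pos (by simp [hq]), if_pos (by simp [hpf, he_nO]),
              if_pos (by simp [hq, hS])]
          refine ih (pre ++ [e]) e.2 (ansA + 1) (ansB + 1) vis _ (pts.add e.2) _
            (insert e (insert (pvRv e) O)) P hW' hch' (by rw [hmemP]; exact hq)
            (pvC1_update _ path O e hKFR hC1) (by rw [hC2]; ring) ?_ ?_
            (pvSrev_update edgs e hSrev) hV' hSV' ?_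
          · intro d
            by_cases h1 : d = e
            · subst h1; simp [he_nP]
            · by_cases h2 : d = pvRv e
              · subst h2; simp [hrv_nP]
              · rw [pvMemAdd2, hP d]
                simp [Finset.mem_insert, h1, h2, (by simpa [pvKey_eq_iff] using h1 : pvKey d ≠ pvKey e),
                  (by simpa [pvKey_eq_iff] using h2 : pvKey d ≠ pvKey (pvRv e))]
          · intro d hd
            rw [pvMemAdd2]
            rcases Finset.mem_insert.mp hd with rfl | hd
            · exact Or.inr (Or.inl rfl)
            · rcases Finset.mem_insert.mp hd with rfl | hd
              · exact Or.inr (Or.inr rfl)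
              · exact Or.inl (hOS d hd)
          · intro d hd
            rcases List.mem_cons.mp (hfut d hd) with h | h
            · exact absurd (by rwa [h] at hd : e ∈ P) he_nP
            · exact h
        · -- A's count is deferred: pending edge pvRv e is created
          have hpt : pvPth FullW (pvKey e) = true := by
            cases h : pvPth FullW (pvKey e)
            · exact absurd h hpf
            · rfl
          have hpthR : pvPth FullW (pvKey (pvRv e)) = false := by
            rw [hpt] at hG1
            cases h : pvPth FullW (pvKey (pvRv e))
            · rfl
            · rw [h] at hG1; simp at hG1
          have hrv_nO : pvRv e ∉ O := fun h => hSr (hOS _ h)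
          have hfutrv : pvRv e ∈ es := pvPth_future pre e hne_e es (by rw [← hW]; exact hpt)
          rw [if_pos (by simp [hq]), if_neg (by simp [hpt]),
              if_pos (by simp [hq, hS])]
          refine ih (pre ++ [e]) e.2 ansA (ansB + 1) vis path (pts.add e.2) _
            O (insert (pvRv e) P) hW' hch' (by rw [hmemP]; exact hq) hC1 ?_ ?_ ?_
            (pvSrev_update edgs e hSrev) hV' hSV' ?_
          · rw [hC2, Finset.card_insert_of_notMem hrv_nP]; push_cast; ring
          · intro d
            by_cases h1 : d = pvRv e
            · subst h1
              constructor
              · intro _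
                exact ⟨(pvMemAdd2 edgs e _).mpr (Or.inr (Or.inr rfl)), hrv_nO, hpthR⟩
              · intro _
                exact Finset.mem_insert_self _ _
            · by_cases h2 : d = e
              · subst h2
                simp only [Finset.mem_insert]
                constructor
                · rintro (h | h)
                  · exact absurd h (pvNe_rv hne_e)
                  · exact absurd h he_nP
                · rintro ⟨-, -, h⟩
                  rw [hpt] at h; exact absurd h (by simp)
              · rw [Finset.mem_insert, pvMemAdd2, hP d]
                simp [h1, (by simpa [pvKey_eq_iff] using h2 : pvKey d ≠ pvKey e),
                  (by simpa [pvKey_eq_iff] using h1 : pvKey d ≠ pvKey (pvRv e))]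
          · intro d hd
            exact (pvMemAdd2 edgs e _).mpr (Or.inl (hOS d hd))
          · intro d hd
            rcases Finset.mem_insert.mp hd with rfl | hd
            · exact hfutrv
            · rcases List.mem_cons.mp (hfut d hd) with h | h
              · exact absurd (by rwa [h] at hd : e ∈ P) he_nP
              · exact h
    · -- new point: neither counts; A takes its else-branch
      have hkF : pvKey e ∉ edgs := fun h => hq (hSV e h).2
      have hkR : pvKey (pvRv e) ∉ edgs := fun h => hkF ((hSrev e).mpr h)
      have he_nO : e ∉ O := fun h => hkF (hOS e h)
      have he_nP : e ∉ P := fun h => hkF ((hP e).mp h).1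
      rw [if_neg (by simp [hq]), if_neg (by simp [hq])]
      refine ih (pre ++ [e]) e.2 ansA ansB _ _ (pts.add e.2) _
        (insert e (insert (pvRv e) O)) P hW' hch' (by rw [PySem.Set.mem_add]; exact Or.inr rfl)
        (pvC1_update _ path O e hKFR hC1) hC2 ?_ ?_
        (pvSrev_update edgs e hSrev) ?_ ?_ ?_
      · intro d
        by_cases h1 : d = e
        · subst h1; simp [he_nP]
        · by_cases h2 : d = pvRv e
          · subst h2
            have hnp : pvRv e ∉ P := fun h => hkR ((hP (pvRv e)).mp h).1
            simp [hnp, Finset.mem_insert]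
          · rw [pvMemAdd2, hP d]
            simp [Finset.mem_insert, h1, h2, (by simpa [pvKey_eq_iff] using h1 : pvKey d ≠ pvKey e),
              (by simpa [pvKey_eq_iff] using h2 : pvKey d ≠ pvKey (pvRv e))]
      · intro d hd
        rw [pvMemAdd2]
        rcases Finset.mem_insert.mp hd with rfl | hd
        · exact Or.inr (Or.inl rfl)
        · rcases Finset.mem_insert.mp hd with rfl | hd
          · exact Or.inr (Or.inr rfl)
          · exact Or.inl (hOS d hd)
      · intro p
        rw [PySem.Dict.getD_insert]
        by_cases hpe : p = e.2
        · subst hpe; rw [if_pos rfl]; simp [PySem.Set.mem_add]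
        · rw [if_neg hpe, hV p]
          have : p ∈ pts.add e.2 ↔ p ∈ pts := by
            rw [PySem.Set.mem_add]
            exact ⟨fun h => h.elim id (fun h => absurd h hpe), Or.inl⟩
          exact decide_eq_decide.mpr this.symm
      · intro d hd
        rcases (pvMemAdd2 edgs e (pvKey d)).mp hd with hd | hd | hd
        · obtain ⟨h1, h2⟩ := hSV d hd
          exact ⟨by rw [PySem.Set.mem_add]; exact Or.inl h1, by rw [PySem.Set.mem_add]; exact Or.inl h2⟩
        · rw [pvKey_inj hd]
          exact ⟨by rw [PySem.Set.mem_add]; exact Or.inl (show e.1 ∈ pts by rw [hec]; exact hc),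
            by rw [PySem.Set.mem_add]; exact Or.inr rfl⟩
        · rw [pvKey_inj hd]
          exact ⟨by rw [PySem.Set.mem_add]; exact Or.inr rfl,
            by rw [PySem.Set.mem_add]; exact Or.inl (show e.1 ∈ pts by rw [hec]; exact hc)⟩
      · intro d hd
        rcases List.mem_cons.mp (hfut d hd) with h | h
        · exact absurd (by rwa [h] at hd : e ∈ P) he_nP
        · exact h
def pvDirs (arrows : List Int) : List Int := arrows.flatMap (fun a => [a, a])

theorem pvFoldDouble {σ : Type} (g : σ → Int → σ) (l : List Int) (s : σ) :
    l.foldl (fun s a => (PySem.List.pyRange 0 2 1).foldl (fun s _ => g s a) s) s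
      = (pvDirs l).foldl g s := by
  induction l generalizing s with
  | nil => rfl
  | cons a l ih =>
    have h2 : PySem.List.pyRange 0 2 1 = [0, 1] := by decide
    simp [pvDirs, List.flatMap_cons, h2, List.foldl] at *
    exact ih _

theorem pvSolA (arrows : List Int) :
    solution arrows = pvModelA 0
      ((pvVis0 (PySem.Dict.empty.insert ((0 : Int), (0 : Int)) false) (pvWalk ((0 : Int), (0 : Int)) (pvDirs arrows))).insert ((0 : Int), (0 : Int)) true)
      (pvPath0 (pvWalk ((0 : Int), (0 : Int)) (pvDirs arrows)))
      (pvWalk ((0 : Int), (0 : Int)) (pvDirs arrows)) := by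
  unfold solution
  rw [pvFoldDouble]
  rw [pvFirstPass (pvDirs arrows) _ _ _ ((0 : Int), (0 : Int))]
  simp only [List.singleton_append]
  exact pvReplayA _ ((0 : Int), (0 : Int)) 0 _ _ (pvWalk_chained _ _)

theorem pvSolB (arrows : List Int) :
    solution_alt arrows = pvModelB 0 (PySem.Set.ofList [((0 : Int), (0 : Int))])
      (PySem.Set.empty : PySem.Set pvEd) (pvWalk ((0 : Int), (0 : Int)) (pvDirs arrows)) := by
  unfold solution_alt
  rw [pvFoldDouble]
  exact pvFoldB (pvDirs arrows) ((0 : Int), (0 : Int)) 0 _ _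

theorem pvMain (arrows : List Int) (hpre : ∀ a ∈ arrows, -8 ≤ a ∧ a < 8) :
    solution arrows = solution_alt arrows := by
  rw [pvSolA, pvSolB]
  have hdist : ∀ f ∈ pvWalk ((0 : Int), (0 : Int)) (pvDirs arrows), f.1 ≠ f.2 := by
    apply pvWalk_ne
    intro a ha
    rw [pvDirs, List.mem_flatMap] at ha
    obtain ⟨b, hb, hab⟩ := ha
    simp at hab
    obtain ⟨h1, h2⟩ := hpre b hb
    rw [hab]
    exact pvDelta_ne b h1 h2
  refine pvCore _ hdist _ [] ((0 : Int), (0 : Int)) 0 0 _ _ _ _ ∅ ∅ rfl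
    (pvWalk_chained _ _) (by simp [PySem.Set.mem_ofList]) ?_ (by simp) ?_ (by simp) ?_ ?_ ?_ (by simp)
  · intro d; simp [pvPth]
  · intro d
    simp [PySem.Set.empty]
  · intro d
    simp [PySem.Set.empty]
  · intro p
    rw [PySem.Dict.getD_insert]
    by_cases hp : p = ((0 : Int), (0 : Int))
    · subst hp
      rw [if_pos rfl]
      simp [PySem.Set.mem_ofList]
    · rw [if_neg hp]
      have h0 : ∀ q : pvPt, (PySem.Dict.empty.insert ((0 : Int), (0 : Int)) false).getD q false = false := by
        intro q
        rw [PySem.Dict.getD_insert]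
        split <;> simp
      rw [pvVis0_lookup _ _ h0 p]
      have : ¬ (p ∈ PySem.Set.ofList [((0 : Int), (0 : Int))]) := by
        rw [PySem.Set.mem_ofList]; simpa using hp
      simp [this]
  · intro d hd
    simp [PySem.Set.empty] at hd

-- ===== VERDICT (by name: the statement is the Claim_ definition above) =====
theorem solution_spec : Claim_equal_solution := by
  intro arrows _ hpre
  unfold Spec_solution
  exact pvMain arrows hpre
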